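-- pv_equiv track=rewrite | github.com/junbangg/Algorithm-Study | 기출/KAKAO 2022 Internship/2/solution.py | getMinimumMoves
-- ===== SOURCE A (Python) =====
-- def calculateMoves(queue, left, right):
--     end = len(queue)
--     half = end // 2
--     moves = 0
--     # 1 조건
--     if left < half and right < half:
--         moves += right # 첫번째 큐 포인터 부분 전부 이동
--         moves += half # 두번째 큐 전부 이동
--         moves += left # 첫번째 큐 앞 부분 다시 이동
--         return moves
--     # 2 조건
--     if left < half and half <= right < end:
--         moves += left
--         moves += right - half
--         return moves
--     # 3 조건
--     if half <= left < end and half <= right < end: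
--         moves += half # 첫번째 큐 전부 두번째 큐 뒤로 이동
--         moves += (left - half) * 2 # 두번째 큐에서 이동 할 앞 부분 두 번 이동
--         moves += right - left  # 두 번째 큐 에서 첫번째 큐로 이동
--         return moves
--
-- def getMinimumMoves(firstQueue, secondQueue, target):
--     queue = firstQueue + secondQueue
--     queueSize = len(queue)
--     minMoves = float('inf')
--
--     for left in range(1, queueSize-1):
--         total = 0
--
--         for right in range(left + 1, queueSize):
--             total += queue[right-1]
--             if total == target:
--                 minMoves = min(minMoves, calculateMoves(queue, left, right))
--     return -1 if minMoves == float('inf') else minMoves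
-- ===== SOURCE B (Python) =====
-- def getMinimumMoves(firstQueue, secondQueue, target):
--     queue = firstQueue + secondQueue
--     n = len(queue)
--     half = n // 2
--     # prefix[i] = sum of queue[:i]
--     prefix = [0]
--     for x in queue:
--         prefix.append(prefix[-1] + x)
--     best = None
--     minLeft = {}  # prefix-sum value -> smallest left index (>= 1) having it
--     for right in range(2, n):
--         p = prefix[right - 1]
--         if p not in minLeft:
--             minLeft[p] = right - 1
--         need = prefix[right] - target
--         if need in minLeft:
--             left = minLeft[need]
--             moves = left + right + (half if right < half else -half)
--             if best is None or moves < best: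
--                 best = moves
--     return -1 if best is None else best
-- ===== Notes on version B (the rewrite author's own statement) =====
-- stated objective: faster
-- what changed: Replaced the O(n^2) double loop (re-summing windows and a 3-case move helper) by one O(n) pass: prefix sums plus a hash map from prefix value to smallest left index, using that the move count simplifies to left+right±half, so the best pair for each right is the minimal matching left.
import Mathlib
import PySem

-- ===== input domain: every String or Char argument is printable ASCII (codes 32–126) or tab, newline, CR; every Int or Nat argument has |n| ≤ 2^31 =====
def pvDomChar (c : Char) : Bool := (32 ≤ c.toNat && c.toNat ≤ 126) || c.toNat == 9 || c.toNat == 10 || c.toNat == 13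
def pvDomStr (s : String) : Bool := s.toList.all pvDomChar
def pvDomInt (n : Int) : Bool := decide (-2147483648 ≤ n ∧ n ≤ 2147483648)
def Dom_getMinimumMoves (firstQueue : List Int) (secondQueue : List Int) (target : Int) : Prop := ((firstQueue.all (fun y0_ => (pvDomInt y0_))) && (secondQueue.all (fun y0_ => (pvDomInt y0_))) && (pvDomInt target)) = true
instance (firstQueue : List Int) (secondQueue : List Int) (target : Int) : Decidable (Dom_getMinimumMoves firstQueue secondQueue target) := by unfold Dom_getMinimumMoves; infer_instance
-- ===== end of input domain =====

-- B replaces A's O(n^2) double loop by one O(n) pass with prefix sums and a hash map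
-- from prefix value to smallest left index (the move count simplifies to left+right±half).


-- ===== PORT A =====
-- helper of A; the final 0 stands for Python's fall-through `None`, unreachable from
-- getMinimumMoves (there always left < right, so one of the three branches fires)
def calculateMoves (queue : List Int) (left right : Int) : Int :=
  let e := PySem.List.len queue
  let half := PySem.Int.floordiv e 2
  if left < half ∧ right < half then
    0 + right + half + left
  else if left < half ∧ (half ≤ right ∧ right < e) then
    0 + left + (right - half)
  else if (half ≤ left ∧ left < e) ∧ (half ≤ right ∧ right < e) then
    0 + half + (left - half) * 2 + (right - left)
  else 0

-- min(minMoves, x) where minMoves may be float('inf'), modeled as none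
def pyMinInf (mm : Option Int) (x : Int) : Option Int :=
  some (match mm with | none => x | some m => min m x)

def getMinimumMoves (firstQueue : List Int) (secondQueue : List Int) (target : Int) : Int :=
  let queue := firstQueue ++ secondQueue
  let queueSize := PySem.List.len queue
  -- minMoves : Option Int; none models float('inf')
  let minMoves : Option Int := none
  let minMoves := (PySem.List.pyRange 1 (queueSize - 1) 1).foldl (fun mm left =>
    ((PySem.List.pyRange (left + 1) queueSize 1).foldl
      (fun (st : Int × Option Int) right =>
        let total := st.1 + PySem.List.pyGetD queue (right - 1) 0
        (total, if total = target then pyMinInf st.2 (calculateMoves queue left right) else st.2))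
      (0, mm)).2) minMoves
  match minMoves with
  | none => -1
  | some m => m

-- ===== PORT B =====
def getMinimumMoves_alt (firstQueue : List Int) (secondQueue : List Int) (target : Int) : Int :=
  let queue := firstQueue ++ secondQueue
  let n := PySem.List.len queue
  let half := PySem.Int.floordiv n 2
  let pr := queue.foldl (fun acc x => acc ++ [PySem.List.pyGetD acc (-1) 0 + x]) [0]
  let st := (PySem.List.pyRange 2 n 1).foldl
    (fun (st : Option Int × PySem.Dict Int Int) right =>
      let p := PySem.List.pyGetD pr (right - 1) 0
      let minLeft := if st.2.contains p then st.2 else st.2.insert p (right - 1)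
      let need := PySem.List.pyGetD pr right 0 - target
      match minLeft.get? need with
      | some left =>
        (match st.1 with
         | none => some (left + right + (if right < half then half else -half))
         | some b =>
           if left + right + (if right < half then half else -half) < b then
             some (left + right + (if right < half then half else -half))
           else some b, minLeft)
      | none => (st.1, minLeft))
    (none, PySem.Dict.empty)
  match st.1 with
  | none => -1
  | some m => m

-- ===== PRECONDITION & SPEC =====
def Spec_getMinimumMoves (firstQueue : List Int) (secondQueue : List Int) (target : Int) (out : Int) : Prop := out = getMinimumMoves_alt firstQueue secondQueue target
instance (firstQueue : List Int) (secondQueue : List Int) (target : Int) (out : Int) : Decidable (Spec_getMinimumMoves firstQueue secondQueue target out) := by unfold Spec_getMinimumMoves; infer_instance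

-- ===== CLAIM (what is proved, stated in full; the proofs are below) =====
def Claim_equal_getMinimumMoves : Prop := ∀ (firstQueue : List Int) (secondQueue : List Int) (target : Int), Dom_getMinimumMoves firstQueue secondQueue target → Spec_getMinimumMoves firstQueue secondQueue target (getMinimumMoves firstQueue secondQueue target)

-- ===== LEMMAS AND PROOFS =====

-- prefix sum of q up to (exclusive) index i
def pvP (q : List Int) (i : Int) : Int := (q.take i.toNat).sum

-- the common move count for a matching pair (half = len q // 2)
def pvMv (half l r : Int) : Int := l + r + (if r < half then half else -half)

-- o is the minimum of the set S (none = S empty)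
def IsMinOf (o : Option Int) (S : Int → Prop) : Prop :=
  match o with
  | none => ∀ x, ¬ S x
  | some m => S m ∧ ∀ x, S x → m ≤ x

theorem isMinOf_unique {o o' : Option Int} {S : Int → Prop}
    (h : IsMinOf o S) (h' : IsMinOf o' S) : o = o' := by
  cases o with
  | none => cases o' with
    | none => rfl
    | some m => exact absurd h'.1 (h m)
  | some m => cases o' with
    | none => exact absurd h.1 (h' m)
    | some m' =>
      simp only [IsMinOf] at h h'
      exact congrArg some (le_antisymm (h.2 m' h'.1) (h'.2 m h.1))

theorem isMinOf_congr {o : Option Int} {S S' : Int → Prop}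
    (hiff : ∀ x, S x ↔ S' x) (h : IsMinOf o S) : IsMinOf o S' := by
  cases o with
  | none => exact fun x hx => h x ((hiff x).mpr hx)
  | some m => exact ⟨(hiff m).mp h.1, fun x hx => h.2 x ((hiff x).mpr hx)⟩

theorem isMinOf_step {o : Option Int} {S : Int → Prop} {v : Int}
    (h : IsMinOf o S) : IsMinOf (pyMinInf o v) (fun x => S x ∨ x = v) := by
  cases o with
  | none =>
    refine ⟨Or.inr rfl, ?_⟩
    rintro x (hx | rfl)
    · exact absurd hx (h x)
    · exact le_refl x
  | some m =>
    simp only [IsMinOf, pyMinInf] at h ⊢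
    refine ⟨?_, ?_⟩
    · rcases le_total m v with hle | hle
      · rw [min_eq_left hle]; exact Or.inl h.1
      · rw [min_eq_right hle]; exact Or.inr rfl
    · rintro x (hx | rfl)
      · exact le_trans (min_le_left m v) (h.2 x hx)
      · exact min_le_right m x

-- step with a whole new set T whose minimum is v
theorem isMinOf_step_set {o : Option Int} {S T : Int → Prop} {v : Int}
    (h : IsMinOf o S) (hv : T v) (hmin : ∀ x, T x → v ≤ x) :
    IsMinOf (pyMinInf o v) (fun x => S x ∨ T x) := by
  cases o with
  | none =>
    refine ⟨Or.inr hv, ?_⟩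
    rintro x (hx | hx)
    · exact absurd hx (h x)
    · exact hmin x hx
  | some m =>
    simp only [IsMinOf, pyMinInf] at h ⊢
    refine ⟨?_, ?_⟩
    · rcases le_total m v with hle | hle
      · rw [min_eq_left hle]; exact Or.inl h.1
      · rw [min_eq_right hle]; exact Or.inr hv
    · rintro x (hx | hx)
      · exact le_trans (min_le_left m v) (h.2 x hx)
      · exact le_trans (min_le_right m v) (hmin x hx)

theorem pyMinInf_eq_match (o : Option Int) (v : Int) :
    (match o with
     | none => some v
     | some b => if v < b then some v else some b) = pyMinInf o v := by
  cases o with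
  | none => rfl
  | some b =>
    simp only [pyMinInf]
    split_ifs with h
    · rw [min_eq_right (le_of_lt h)]
    · rw [min_eq_left (by omega)]

theorem pvP_succ (q : List Int) (i : Int) (h0 : 0 ≤ i) (h1 : i < PySem.List.len q) :
    pvP q (i + 1) = pvP q i + PySem.List.pyGetD q i 0 := by
  unfold pvP
  have hlen : i.toNat < q.length := by
    simp only [PySem.List.len_eq] at h1; omega
  have h2 : (i + 1).toNat = i.toNat + 1 := by omega
  rw [h2, PySem.List.pyGetD_eq_getElem q 0 h0 (by simpa [PySem.List.len_eq] using h1),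
    List.take_add_one, List.getElem?_eq_getElem hlen]
  simp only [Option.toList_some, List.sum_append, List.sum_cons, List.sum_nil, add_zero]

theorem calc_eq_mv (q : List Int) (l r : Int) (h1 : 1 ≤ l) (h2 : l < r)
    (h3 : r < PySem.List.len q) :
    calculateMoves q l r = pvMv (PySem.Int.floordiv (PySem.List.len q) 2) l r := by
  simp only [calculateMoves, pvMv]
  split_ifs <;> omega

-- the list of prefix sums from running total s over ys
def pvPrefixes (s : Int) : List Int → List Int
  | [] => []
  | x :: ys => (s + x) :: pvPrefixes (s + x) ys

theorem fold_prefixes (ys : List Int) : ∀ (acc : List Int) (s : Int),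
    ys.foldl (fun acc x => acc ++ [PySem.List.pyGetD acc (-1) 0 + x]) (acc ++ [s])
      = (acc ++ [s]) ++ pvPrefixes s ys := by
  induction ys with
  | nil => intro acc s; simp [pvPrefixes]
  | cons x t ih =>
    intro acc s
    simp only [List.foldl_cons, PySem.List.pyGetD_neg_one_append_singleton, pvPrefixes]
    rw [ih (acc ++ [s]) (s + x)]
    simp

theorem pvPrefixes_getD (ys : List Int) : ∀ (s : Int) (k : Nat), k < ys.length →
    (pvPrefixes s ys).getD k 0 = s + (ys.take (k + 1)).sum := by
  induction ys with
  | nil => intro s k h; simp at h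
  | cons x t ih =>
    intro s k h
    cases k with
    | zero => simp [pvPrefixes]
    | succ k =>
      simp only [pvPrefixes, List.getD_cons_succ]
      rw [ih (s + x) k (by simpa using h)]
      simp [List.take_succ_cons]
      ring

theorem length_pvPrefixes (ys : List Int) : ∀ s, (pvPrefixes s ys).length = ys.length := by
  induction ys with
  | nil => intro s; rfl
  | cons x t ih => intro s; simp [pvPrefixes, ih]

theorem prefix_getD (q : List Int) (i : Int) (h0 : 0 ≤ i) (h1 : i ≤ PySem.List.len q) :
    PySem.List.pyGetD ([0] ++ pvPrefixes 0 q) i 0 = pvP q i := by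
  have hL := length_pvPrefixes q 0
  have hq : i ≤ (q.length : Int) := by simpa [PySem.List.len_eq] using h1
  have hlen : i < (([0] ++ pvPrefixes 0 q).length : Int) := by
    simp [hL]; omega
  rw [PySem.List.pyGetD_eq_getElem _ 0 h0 hlen,
    ← List.getD_eq_getElem ([0] ++ pvPrefixes 0 q) 0 (by omega)]
  rcases hk : i.toNat with _ | k
  · have hi0 : i = 0 := by omega
    simp [hi0, pvP]
  · have hkq : k < q.length := by omega
    simp only [List.cons_append, List.nil_append, List.getD_cons_succ]
    rw [pvPrefixes_getD q 0 k hkq]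
    simp [pvP, hk]

-- ---- A's loops ----

theorem innerA (q : List Int) (t left : Int) (hl : 1 ≤ left) :
    ∀ (k : Nat) (a : Int), a = PySem.List.len q - k → left < a →
    ∀ (mm : Option Int) (S : Int → Prop), IsMinOf mm S →
    IsMinOf (((PySem.List.pyRange a (PySem.List.len q) 1).foldl
        (fun (st : Int × Option Int) right =>
          (st.1 + PySem.List.pyGetD q (right - 1) 0,
           if st.1 + PySem.List.pyGetD q (right - 1) 0 = t then
             pyMinInf st.2 (calculateMoves q left right) else st.2))
        (pvP q (a - 1) - pvP q left, mm)).2)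
      (fun x => S x ∨ ∃ r, a ≤ r ∧ r < PySem.List.len q ∧
         pvP q r = pvP q left + t ∧ x = calculateMoves q left r) := by
  intro k
  induction k with
  | zero =>
    intro a ha hla mm S hS
    rw [PySem.List.pyRange_one_eq_nil (by omega)]
    simp only [List.foldl_nil]
    refine isMinOf_congr (fun x => ⟨Or.inl, ?_⟩) hS
    rintro (hx | ⟨r, hr1, hr2, _, _⟩)
    · exact hx
    · exact absurd hr2 (by omega)
  | succ k ih =>
    intro a ha hla mm S hS
    have haN : a < PySem.List.len q := by omega
    rw [PySem.List.pyRange_one_cons haN]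
    simp only [List.foldl_cons]
    have hP : pvP q (a - 1) - pvP q left + PySem.List.pyGetD q (a - 1) 0
        = pvP q a - pvP q left := by
      have h5 := pvP_succ q (a - 1) (by omega) (by omega)
      rw [show a - 1 + 1 = a from by ring] at h5
      omega
    rw [hP]
    by_cases hc : pvP q a - pvP q left = t
    · rw [if_pos hc]
      have ih' := ih (a + 1) (by omega) (by omega)
        (pyMinInf mm (calculateMoves q left a)) _ (isMinOf_step hS)
      rw [show a + 1 - 1 = a from by ring] at ih'
      refine isMinOf_congr ?_ ih'
      intro x
      constructor
      · rintro ((hx | hx) | ⟨r, hr1, hr2, hr3, hr4⟩)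
        · exact Or.inl hx
        · exact Or.inr ⟨a, le_refl a, haN, by omega, hx⟩
        · exact Or.inr ⟨r, by omega, hr2, hr3, hr4⟩
      · rintro (hx | ⟨r, hr1, hr2, hr3, hr4⟩)
        · exact Or.inl (Or.inl hx)
        · rcases eq_or_lt_of_le hr1 with rfl | hr
          · exact Or.inl (Or.inr hr4)
          · exact Or.inr ⟨r, by omega, hr2, hr3, hr4⟩
    · rw [if_neg hc]
      have ih' := ih (a + 1) (by omega) (by omega) mm S hS
      rw [show a + 1 - 1 = a from by ring] at ih'
      refine isMinOf_congr ?_ ih'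
      intro x
      constructor
      · rintro (hx | ⟨r, hr1, hr2, hr3, hr4⟩)
        · exact Or.inl hx
        · exact Or.inr ⟨r, by omega, hr2, hr3, hr4⟩
      · rintro (hx | ⟨r, hr1, hr2, hr3, hr4⟩)
        · exact Or.inl hx
        · rcases eq_or_lt_of_le hr1 with rfl | hr
          · exact absurd hr3 (by omega)
          · exact Or.inr ⟨r, by omega, hr2, hr3, hr4⟩

theorem outerA (q : List Int) (t : Int) :
    ∀ (k : Nat) (a : Int), a = (PySem.List.len q - 1) - k → 1 ≤ a →
    ∀ (mm : Option Int) (S : Int → Prop), IsMinOf mm S →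
    IsMinOf ((PySem.List.pyRange a (PySem.List.len q - 1) 1).foldl (fun mm left =>
        ((PySem.List.pyRange (left + 1) (PySem.List.len q) 1).foldl
          (fun (st : Int × Option Int) right =>
            (st.1 + PySem.List.pyGetD q (right - 1) 0,
             if st.1 + PySem.List.pyGetD q (right - 1) 0 = t then
               pyMinInf st.2 (calculateMoves q left right) else st.2))
          (0, mm)).2) mm)
      (fun x => S x ∨ ∃ l r, a ≤ l ∧ l < r ∧ r < PySem.List.len q ∧
         pvP q r = pvP q l + t ∧ x = calculateMoves q l r) := by
  intro k
  induction k with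
  | zero =>
    intro a ha h1a mm S hS
    rw [PySem.List.pyRange_one_eq_nil (by omega)]
    simp only [List.foldl_nil]
    refine isMinOf_congr (fun x => ⟨Or.inl, ?_⟩) hS
    rintro (hx | ⟨l, r, hl1, hl2, hl3, _, _⟩)
    · exact hx
    · exact absurd hl3 (by omega)
  | succ k ih =>
    intro a ha h1a mm S hS
    have haN : a < PySem.List.len q - 1 := by omega
    rw [PySem.List.pyRange_one_cons haN]
    simp only [List.foldl_cons]
    have hz : (0 : Int) = pvP q (a + 1 - 1) - pvP q a := by
      rw [show a + 1 - 1 = a from by ring]; ring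
    have hinner := innerA q t a h1a (PySem.List.len q - (a + 1)).toNat (a + 1)
      (by omega) (by omega) mm S hS
    rw [← hz] at hinner
    have ih' := ih (a + 1) (by omega) (by omega) _ _ hinner
    refine isMinOf_congr ?_ ih'
    intro x
    constructor
    · rintro ((hx | ⟨r, hr1, hr2, hr3, hr4⟩) | ⟨l, r, hl1, hl2, hl3, hl4, hl5⟩)
      · exact Or.inl hx
      · exact Or.inr ⟨a, r, le_refl a, by omega, hr2, hr3, hr4⟩
      · exact Or.inr ⟨l, r, by omega, hl2, hl3, hl4, hl5⟩
    · rintro (hx | ⟨l, r, hl1, hl2, hl3, hl4, hl5⟩)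
      · exact Or.inl (Or.inl hx)
      · rcases eq_or_lt_of_le hl1 with rfl | hl
        · exact Or.inl (Or.inr ⟨r, by omega, hl3, hl4, hl5⟩)
        · exact Or.inr ⟨l, r, by omega, hl2, hl3, hl4, hl5⟩

-- ---- B's loop ----

-- dict invariant before processing right = a: minLeft maps each prefix value reachable
-- from a left in [1, a-2] to the smallest such left
def pvDictInv (q : List Int) (d : PySem.Dict Int Int) (a : Int) : Prop :=
  (∀ v, d.contains v = true ↔ ∃ l, 1 ≤ l ∧ l ≤ a - 2 ∧ pvP q l = v) ∧
  (∀ v l, d.get? v = some l →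
     1 ≤ l ∧ l ≤ a - 2 ∧ pvP q l = v ∧ ∀ l', 1 ≤ l' → l' < l → pvP q l' ≠ v)

theorem dictInv_step (q : List Int) (d : PySem.Dict Int Int) (a : Int)
    (h : pvDictInv q d a) (h2 : 2 ≤ a) :
    pvDictInv q (if d.contains (pvP q (a - 1)) then d
                 else d.insert (pvP q (a - 1)) (a - 1)) (a + 1) := by
  obtain ⟨hc, hg⟩ := h
  by_cases hcc : d.contains (pvP q (a - 1))
  · rw [if_pos hcc]
    constructor
    · intro v
      rw [hc v]
      constructor
      · rintro ⟨l, hl1, hl2, hl3⟩; exact ⟨l, hl1, by omega, hl3⟩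
      · rintro ⟨l, hl1, hl2, hl3⟩
        rcases lt_or_ge l (a - 1) with hl | hl
        · exact ⟨l, hl1, by omega, hl3⟩
        · have hle : l = a - 1 := by omega
          subst hle
          rw [← hl3]
          exact (hc _).mp hcc
    · intro v l hvl
      obtain ⟨g1, g2, g3, g4⟩ := hg v l hvl
      exact ⟨g1, by omega, g3, g4⟩
  · rw [if_neg hcc]
    constructor
    · intro v
      rw [PySem.Dict.contains_insert]
      constructor
      · intro hv
        rcases Bool.or_eq_true_iff.mp hv with hv | hv
        · exact ⟨a - 1, by omega, by omega, (eq_of_beq hv).symm⟩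
        · obtain ⟨l, hl1, hl2, hl3⟩ := (hc v).mp hv
          exact ⟨l, hl1, by omega, hl3⟩
      · rintro ⟨l, hl1, hl2, hl3⟩
        rcases lt_or_ge l (a - 1) with hl | hl
        · have : d.contains v = true := (hc v).mpr ⟨l, hl1, by omega, hl3⟩
          simp [this]
        · have hle : l = a - 1 := by omega
          subst hle
          simp [← hl3]
    · intro v l hvl
      rw [PySem.Dict.get?_insert] at hvl
      by_cases hv : v = pvP q (a - 1)
      · rw [if_pos hv] at hvl
        have hla : l = a - 1 := by injection hvl with h'; omega
        subst hla
        refine ⟨by omega, by omega, hv.symm, ?_⟩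
        intro l' hl'1 hl'2 heq
        exact absurd ((hc v).mpr ⟨l', hl'1, by omega, heq⟩) (by simpa [hv] using hcc)
      · rw [if_neg hv] at hvl
        obtain ⟨g1, g2, g3, g4⟩ := hg v l hvl
        exact ⟨g1, by omega, g3, g4⟩

theorem dictInv_empty (q : List Int) : pvDictInv q PySem.Dict.empty 2 := by
  constructor
  · intro v
    simp only [PySem.Dict.contains_empty]
    constructor
    · intro h; exact absurd h (by simp)
    · rintro ⟨l, hl1, hl2, _⟩; omega
  · intro v l h
    simp [PySem.Dict.get?_empty] at h

theorem loopB (q : List Int) (t : Int) :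
    ∀ (k : Nat) (a : Int), a = PySem.List.len q - k → 2 ≤ a →
    ∀ (best : Option Int) (d : PySem.Dict Int Int) (S : Int → Prop),
    IsMinOf best S → pvDictInv q d a →
    IsMinOf (((PySem.List.pyRange a (PySem.List.len q) 1).foldl
        (fun (st : Option Int × PySem.Dict Int Int) right =>
          match (if st.2.contains (PySem.List.pyGetD ([0] ++ pvPrefixes 0 q) (right - 1) 0) then st.2
                 else st.2.insert (PySem.List.pyGetD ([0] ++ pvPrefixes 0 q) (right - 1) 0) (right - 1)).get?
                (PySem.List.pyGetD ([0] ++ pvPrefixes 0 q) right 0 - t) with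
          | some left =>
            (match st.1 with
             | none => some (left + right + (if right < PySem.Int.floordiv (PySem.List.len q) 2 then PySem.Int.floordiv (PySem.List.len q) 2 else -PySem.Int.floordiv (PySem.List.len q) 2))
             | some b =>
               if left + right + (if right < PySem.Int.floordiv (PySem.List.len q) 2 then PySem.Int.floordiv (PySem.List.len q) 2 else -PySem.Int.floordiv (PySem.List.len q) 2) < b then
                 some (left + right + (if right < PySem.Int.floordiv (PySem.List.len q) 2 then PySem.Int.floordiv (PySem.List.len q) 2 else -PySem.Int.floordiv (PySem.List.len q) 2))
               else some b,
             if st.2.contains (PySem.List.pyGetD ([0] ++ pvPrefixes 0 q) (right - 1) 0) then st.2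
             else st.2.insert (PySem.List.pyGetD ([0] ++ pvPrefixes 0 q) (right - 1) 0) (right - 1))
          | none =>
            (st.1,
             if st.2.contains (PySem.List.pyGetD ([0] ++ pvPrefixes 0 q) (right - 1) 0) then st.2
             else st.2.insert (PySem.List.pyGetD ([0] ++ pvPrefixes 0 q) (right - 1) 0) (right - 1)))
        (best, d)).1)
      (fun x => S x ∨ ∃ l r, 1 ≤ l ∧ l < r ∧ a ≤ r ∧ r < PySem.List.len q ∧
         pvP q r = pvP q l + t ∧ x = pvMv (PySem.Int.floordiv (PySem.List.len q) 2) l r) := by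
  intro k
  induction k with
  | zero =>
    intro a ha h2a best d S hbest hinv
    rw [PySem.List.pyRange_one_eq_nil (by omega)]
    simp only [List.foldl_nil]
    refine isMinOf_congr (fun x => ⟨Or.inl, ?_⟩) hbest
    rintro (hx | ⟨l, r, _, _, hr1, hr2, _, _⟩)
    · exact hx
    · exact absurd hr2 (by omega)
  | succ k ih =>
    intro a ha h2a best d S hbest hinv
    have haN : a < PySem.List.len q := by omega
    rw [PySem.List.pyRange_one_cons haN]
    simp only [List.foldl_cons]
    rw [prefix_getD q (a - 1) (by omega) (by omega), prefix_getD q a (by omega) (by omega)]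
    have hinv' := dictInv_step q d a hinv h2a
    rcases hget : (if d.contains (pvP q (a - 1)) then d
        else d.insert (pvP q (a - 1)) (a - 1)).get? (pvP q a - t) with _ | left
    · simp only []
      have ih' := ih (a + 1) (by omega) (by omega) best _ S hbest hinv'
      refine isMinOf_congr ?_ ih'
      intro x
      constructor
      · rintro (hx | ⟨l, r, hl1, hl2, hr1, hr2, hr3, hr4⟩)
        · exact Or.inl hx
        · exact Or.inr ⟨l, r, hl1, hl2, by omega, hr2, hr3, hr4⟩
      · rintro (hx | ⟨l, r, hl1, hl2, hr1, hr2, hr3, hr4⟩)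
        · exact Or.inl hx
        · rcases eq_or_lt_of_le hr1 with heq | hr
          · exfalso
            subst heq
            have hcont : (if d.contains (pvP q (a - 1)) then d
                else d.insert (pvP q (a - 1)) (a - 1)).contains (pvP q a - t) = true :=
              (hinv'.1 _).mpr ⟨l, hl1, by omega, by omega⟩
            rw [PySem.Dict.contains_eq_isSome_get?, hget] at hcont
            simp at hcont
          · exact Or.inr ⟨l, r, hl1, hl2, by omega, hr2, hr3, hr4⟩
    · simp only []
      obtain ⟨hl1, hl2, hl3, hl4⟩ := hinv'.2 _ _ hget
      rw [pyMinInf_eq_match best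
        (left + a + (if a < PySem.Int.floordiv (PySem.List.len q) 2 then PySem.Int.floordiv (PySem.List.len q) 2 else -PySem.Int.floordiv (PySem.List.len q) 2))]
      have hb' := isMinOf_step_set (T := fun x => ∃ l, 1 ≤ l ∧ l < a ∧
          pvP q a = pvP q l + t ∧ x = pvMv (PySem.Int.floordiv (PySem.List.len q) 2) l a)
        hbest ⟨left, hl1, by omega, by omega, rfl⟩ ?_
      · have ih' := ih (a + 1) (by omega) (by omega) _ _ _ hb' hinv'
        refine isMinOf_congr ?_ ih'
        intro x
        constructor
        · rintro ((hx | ⟨l, hx1, hx2, hx3, hx4⟩) | ⟨l, r, hl1', hl2', hr1, hr2, hr3, hr4⟩)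
          · exact Or.inl hx
          · exact Or.inr ⟨l, a, hx1, hx2, le_refl a, haN, by omega, hx4⟩
          · exact Or.inr ⟨l, r, hl1', hl2', by omega, hr2, hr3, hr4⟩
        · rintro (hx | ⟨l, r, hl1', hl2', hr1, hr2, hr3, hr4⟩)
          · exact Or.inl (Or.inl hx)
          · rcases eq_or_lt_of_le hr1 with rfl | hr
            · exact Or.inl (Or.inr ⟨l, hl1', hl2', by omega, hr4⟩)
            · exact Or.inr ⟨l, r, hl1', hl2', by omega, hr2, hr3, hr4⟩
      · rintro x ⟨l, hx1, hx2, hx3, rfl⟩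
        have hle : left ≤ l := by
          by_contra hlt
          exact hl4 l hx1 (by omega) (by omega)
        simp only [pvMv]
        omega

-- ===== VERDICT (by name: the statement is the Claim_ definition above) =====
theorem getMinimumMoves_spec : Claim_equal_getMinimumMoves := by
  unfold Claim_equal_getMinimumMoves Spec_getMinimumMoves
  intro f s t _
  simp only [getMinimumMoves, getMinimumMoves_alt]
  rw [show [(0 : Int)] = ([] : List Int) ++ [0] from rfl, fold_prefixes (f ++ s) [] 0]
  simp only [List.nil_append]
  by_cases hN : PySem.List.len (f ++ s) < 2
  · rw [PySem.List.pyRange_one_eq_nil (a := 1) (by omega),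
      PySem.List.pyRange_one_eq_nil (a := 2) (by omega)]
    rfl
  · have hA := outerA (f ++ s) t (PySem.List.len (f ++ s) - 2).toNat 1 (by omega) (le_refl 1)
      none (fun _ => False) (fun x hx => hx)
    have hB := loopB (f ++ s) t (PySem.List.len (f ++ s) - 2).toNat 2 (by omega) (le_refl 2)
      none PySem.Dict.empty (fun _ => False) (fun x hx => hx) (dictInv_empty (f ++ s))
    have hA' := isMinOf_congr (S' := fun x => ∃ l r, 1 ≤ l ∧ l < r ∧
        r < PySem.List.len (f ++ s) ∧ pvP (f ++ s) r = pvP (f ++ s) l + t ∧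
        x = pvMv (PySem.Int.floordiv (PySem.List.len (f ++ s)) 2) l r) ?_ hA
    · have hB' := isMinOf_congr (S' := fun x => ∃ l r, 1 ≤ l ∧ l < r ∧
          r < PySem.List.len (f ++ s) ∧ pvP (f ++ s) r = pvP (f ++ s) l + t ∧
          x = pvMv (PySem.Int.floordiv (PySem.List.len (f ++ s)) 2) l r) ?_ hB
      · rw [isMinOf_unique hA' hB']
      · intro x
        constructor
        · rintro (h | ⟨l, r, h1, h2, h3, h4, h5, h6⟩)
          · exact h.elim
          · exact ⟨l, r, h1, h2, h4, h5, h6⟩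
        · rintro ⟨l, r, h1, h2, h3, h4, h5⟩
          exact Or.inr ⟨l, r, h1, h2, by omega, h3, h4, h5⟩
    · intro x
      constructor
      · rintro (h | ⟨l, r, h1, h2, h3, h4, h5⟩)
        · exact h.elim
        · exact ⟨l, r, h1, h2, h3, h4, by
            rw [h5, calc_eq_mv (f ++ s) l r h1 h2 h3]⟩
      · rintro ⟨l, r, h1, h2, h3, h4, h5⟩
        exact Or.inr ⟨l, r, h1, h2, h3, h4, by
          rw [h5, calc_eq_mv (f ++ s) l r h1 h2 h3]⟩
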